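-- pv_equiv track=rewrite | github.com/vrublevskiyvitaliy/NER | en_data_provider.py | process_data_mode_type_l_type
-- ===== SOURCE A (Python) =====
-- def process_data_mode_type_l_type(data):
--     correct_data = []
--     for s in data:
--         correct_s = []
--         next_tag = None
--         flag = True
--         for i in reversed(range(len(s))):
--             word = s[i]
--             tag = word[2]
--             if len(tag) > 1:
--                 if flag:
--                     t = 'L-' + tag[2:]
--                     flag = False
--                 else:
--                     if next_tag and next_tag[2:] != tag[2:]:
--                         t = 'L-' + tag[2:]
--                     else:
--                         t = tag[2:]
--             else:
--                 flag = True
--                 t = tag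
--             next_tag = tag
--             correct_s.append((word[0], word[1], t))
--         reversed_list = []
--         for i in reversed(range(len(s))):
--             reversed_list.append(correct_s[i])
--         correct_data.append(reversed_list)
--     return correct_data
-- ===== SOURCE B (Python) =====
-- def _fix(s):
--     out = []
--     next_tags = [w[2] for w in s[1:]] + [None]
--     for (a, b, tag), nxt in zip(s, next_tags):
--         if len(tag) > 1:
--             body = tag[2:]
--             if nxt is None or len(nxt) <= 1 or nxt[2:] != body:
--                 t = 'L-' + body
--             else:
--                 t = body
--         else:
--             t = tag
--         out.append((a, b, t))
--     return out
--
--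
-- def process_data_mode_type_l_type(data):
--     return [_fix(s) for s in data]
-- ===== Notes on version B (the rewrite author's own statement) =====
-- stated objective: simpler
-- what changed: Single forward pass pairing each word with its successor's tag (emit 'L-'+body when the next tag is absent, short, or has a different body), replacing A's reverse pass with next_tag/flag state plus a second index loop that reverses the result back.
import Mathlib
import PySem

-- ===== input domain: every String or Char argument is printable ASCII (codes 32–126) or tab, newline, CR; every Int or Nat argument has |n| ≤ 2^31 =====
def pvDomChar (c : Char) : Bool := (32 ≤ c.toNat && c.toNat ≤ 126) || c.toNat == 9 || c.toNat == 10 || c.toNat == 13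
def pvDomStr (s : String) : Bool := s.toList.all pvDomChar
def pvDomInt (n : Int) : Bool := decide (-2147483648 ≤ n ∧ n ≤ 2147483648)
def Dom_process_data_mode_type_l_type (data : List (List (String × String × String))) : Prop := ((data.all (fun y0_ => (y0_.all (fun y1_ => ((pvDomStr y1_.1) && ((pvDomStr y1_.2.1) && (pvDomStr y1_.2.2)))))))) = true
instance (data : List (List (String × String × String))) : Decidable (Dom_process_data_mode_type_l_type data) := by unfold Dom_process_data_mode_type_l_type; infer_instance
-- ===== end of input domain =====

-- B replaces A's reverse pass (next_tag/flag state) plus a reverse-back index loop by one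
-- forward pass that pairs each word with its successor's tag; same output, simpler structure.


-- ===== PORT A =====
-- one iteration of A's inner reverse loop; state = (next_tag, flag, correct_s)
def pvAStep (st : Option String × Bool × List (String × String × String))
    (word : String × String × String) :
    Option String × Bool × List (String × String × String) :=
  let tag := word.2.2
  if PySem.Str.len tag > 1 then
    if st.2.1 then
      (some tag, false, st.2.2 ++ [(word.1, word.2.1, "L-" ++ PySem.Str.slice tag (some 2) none)])
    else
      let t := if (match st.1 with
                   | none => false
                   | some nt => nt != "" && PySem.Str.slice nt (some 2) none != PySem.Str.slice tag (some 2) none)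
               then "L-" ++ PySem.Str.slice tag (some 2) none
               else PySem.Str.slice tag (some 2) none
      (some tag, false, st.2.2 ++ [(word.1, word.2.1, t)])
  else
    (some tag, true, st.2.2 ++ [(word.1, word.2.1, tag)])

-- the body of A's outer loop for one sentence s (the two inner index loops)
def pvASentence (s : List (String × String × String)) : List (String × String × String) :=
  -- for i in reversed(range(len(s))): … word = s[i] …
  let r := ((PySem.List.pyRange 0 (s.length : Int) 1).reverse).foldl
    (fun st i => pvAStep st (PySem.List.pyGetD s i ("", "", "")))
    ((none : Option String), true, ([] : List (String × String × String)))
  let correct_s := r.2.2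
  -- for i in reversed(range(len(s))): reversed_list.append(correct_s[i])
  let reversed_list := ((PySem.List.pyRange 0 (s.length : Int) 1).reverse).foldl
    (fun acc i => acc ++ [PySem.List.pyGetD correct_s i ("", "", "")]) []
  reversed_list

def process_data_mode_type_l_type (data : List (List (String × String × String))) : List (List (String × String × String)) :=
  data.foldl (fun correct_data s => correct_data ++ [pvASentence s]) []

-- ===== PORT B =====
-- B's per-word step: 'nxt' is the tag of the following word, none at the sentence end
def pvStepB (word : String × String × String) (nxt : Option String) : String × String × String :=
  let tag := word.2.2
  let t :=
    if PySem.Str.len tag > 1 then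
      let body := PySem.Str.slice tag (some 2) none
      if (match nxt with
          | none => true
          | some n => PySem.Str.len n ≤ 1 || PySem.Str.slice n (some 2) none != body)
      then "L-" ++ body
      else body
    else tag
  (word.1, word.2.1, t)

-- B's forward pass: each word paired with its successor's tag ('tail' carries the tag after the list's end)
def pvFixGo : List (String × String × String) → Option String → List (String × String × String)
  | [], _ => []
  | [w], tl => [pvStepB w tl]
  | w :: v :: rest, tl => pvStepB w (some v.2.2) :: pvFixGo (v :: rest) tl

def process_data_mode_type_l_type_alt (data : List (List (String × String × String))) : List (List (String × String × String)) :=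
  data.map (fun s => pvFixGo s none)

-- ===== PRECONDITION & SPEC =====
def Spec_process_data_mode_type_l_type (data : List (List (String × String × String))) (out : List (List (String × String × String))) : Prop := out = process_data_mode_type_l_type_alt data
instance (data : List (List (String × String × String))) (out : List (List (String × String × String))) : Decidable (Spec_process_data_mode_type_l_type data out) := by unfold Spec_process_data_mode_type_l_type; infer_instance

-- ===== CLAIM (what is proved, stated in full; the proofs are below) =====
def Claim_equal_process_data_mode_type_l_type : Prop := ∀ (data : List (List (String × String × String))), Dom_process_data_mode_type_l_type data → Spec_process_data_mode_type_l_type data (process_data_mode_type_l_type data)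

-- ===== LEMMAS AND PROOFS =====

-- the flag A's loop carries is determined by the previously processed tag
def pvFlagOf : Option String → Bool
  | none => true
  | some t => !(PySem.Str.len t > 1)

-- the next_tag component after processing a block r (r in reverse order, so the last
-- element of r is the first word of the sentence prefix)
def pvAfter : List (String × String × String) → Option String → Option String
  | [], ont => ont
  | w :: r, _ => pvAfter r (some w.2.2)

-- a reversed index loop over range(len s) reading s[i] is a fold over s.reverse
theorem pvRevFold {β : Type} (s : List (String × String × String))
    (f : β → (String × String × String) → β) (init : β) :
    ((PySem.List.pyRange 0 (s.length : Int) 1).reverse).foldl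
      (fun st i => f st (PySem.List.pyGetD s i ("", "", ""))) init
    = s.reverse.foldl f init := by
  rw [PySem.List.pyRange_one]
  simp only [sub_zero, Int.toNat_natCast, zero_add, ← List.map_reverse, List.foldl_map,
    PySem.List.pyGetD_natCast]
  have h : (List.range s.length).reverse.map (fun k => s.getD k ("", "", "")) = s.reverse := by
    rw [List.map_reverse]
    congr 1
    apply List.ext_getElem
    · simp
    · intro i h1 h2
      simp [List.getD_eq_getElem?_getD, List.getElem?_eq_getElem h2]
  calc (List.range s.length).reverse.foldl (fun st k => f st (s.getD k ("", "", ""))) init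
      = ((List.range s.length).reverse.map (fun k => s.getD k ("", "", ""))).foldl f init := by
        rw [List.foldl_map]
    _ = s.reverse.foldl f init := by rw [h]

-- the snoc equation for B's forward pass
theorem pvFixGo_append (s : List (String × String × String)) (w : String × String × String)
    (tl : Option String) :
    pvFixGo (s ++ [w]) tl = pvFixGo s (some w.2.2) ++ [pvStepB w tl] := by
  induction s with
  | nil => rfl
  | cons v s' ih =>
    cases s' with
    | nil => rfl
    | cons u s'' => simp only [List.cons_append, pvFixGo] at ih ⊢; rw [ih]

-- a tag longer than 1 character is a nonempty string
theorem pvLongNe (t : String) (h : PySem.Str.len t > 1) : t ≠ "" := by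
  intro heq
  rw [heq] at h
  simp [PySem.Str.len_eq] at h

-- A's step emits exactly B's step when the carried flag matches the carried next_tag
theorem pvStep_eq (ont : Option String) (w : String × String × String) (acc : List (String × String × String)) :
    pvAStep (ont, pvFlagOf ont, acc) w
      = (some w.2.2, pvFlagOf (some w.2.2), acc ++ [pvStepB w ont]) := by
  cases ont with
  | none =>
    simp only [pvAStep, pvStepB, pvFlagOf]
    split_ifs <;> simp_all
  | some nt =>
    have hne := pvLongNe nt
    simp only [pvAStep, pvStepB, pvFlagOf]
    split_ifs <;> first
      | (simp_all; omega)
      | simp_all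

-- main inner-loop invariant: folding A's step over r (the sentence in reverse) appends,
-- in reverse, exactly B's forward pass of r.reverse with trailing tag ont
theorem pvLoop (r : List (String × String × String)) (ont : Option String)
    (acc : List (String × String × String)) :
    r.foldl pvAStep (ont, pvFlagOf ont, acc)
      = (pvAfter r ont, pvFlagOf (pvAfter r ont), acc ++ (pvFixGo r.reverse ont).reverse) := by
  induction r generalizing ont acc with
  | nil => simp [pvAfter, pvFixGo]
  | cons w r' ih =>
    rw [List.foldl_cons, pvStep_eq, ih]
    show _ = (pvAfter r' (some w.2.2), pvFlagOf (pvAfter r' (some w.2.2)), _)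
    have : pvFixGo (w :: r').reverse ont
        = pvFixGo r'.reverse (some w.2.2) ++ [pvStepB w ont] := by
      rw [List.reverse_cons, pvFixGo_append]
    rw [this]
    simp

-- the length of A's accumulated correct_s equals the number of words processed
theorem pvLoopLen (r : List (String × String × String)) (st : Option String × Bool × List (String × String × String)) :
    (r.foldl pvAStep st).2.2.length = st.2.2.length + r.length := by
  induction r generalizing st with
  | nil => simp
  | cons w r' ih =>
    rw [List.foldl_cons, ih]
    simp only [pvAStep]
    split_ifs <;> simp <;> omega

-- A's second loop (append correct_s[i] for i reversed) reverses correct_s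
theorem pvRevLoop (s correct_s : List (String × String × String))
    (hlen : correct_s.length = s.length) :
    ((PySem.List.pyRange 0 (s.length : Int) 1).reverse).foldl
      (fun acc i => acc ++ [PySem.List.pyGetD correct_s i ("", "", "")]) []
    = correct_s.reverse := by
  rw [← hlen, pvRevFold correct_s (fun acc w => acc ++ [w]) []]
  rw [PySem.List.foldl_append_singleton]
  simp

-- per sentence: A's two passes produce exactly B's forward pass
theorem pvSentence (s : List (String × String × String)) :
    pvASentence s = pvFixGo s none := by
  unfold pvASentence
  have h1 : ((PySem.List.pyRange 0 (s.length : Int) 1).reverse).foldl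
      (fun st i => pvAStep st (PySem.List.pyGetD s i ("", "", "")))
      ((none : Option String), true, ([] : List (String × String × String)))
      = s.reverse.foldl pvAStep (none, true, []) := pvRevFold s pvAStep _
  have h2 := pvLoop s.reverse none []
  simp only [pvFlagOf] at h2
  have hlen : (s.reverse.foldl pvAStep ((none : Option String), true,
      ([] : List (String × String × String)))).2.2.length = s.length := by
    rw [pvLoopLen]; simp
  simp only [h1]
  rw [pvRevLoop s _ hlen, h2]
  simp

-- ===== VERDICT (by name: the statement is the Claim_ definition above) =====
theorem process_data_mode_type_l_type_spec : Claim_equal_process_data_mode_type_l_type := by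
  intro data _
  unfold Spec_process_data_mode_type_l_type process_data_mode_type_l_type process_data_mode_type_l_type_alt
  rw [PySem.List.foldl_append_singleton_eq_map pvASentence data []]
  simp [pvSentence]
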